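-- pv_equiv track=rewrite | github.com/TheFelepOwl/transtale | Havryliuk_Denys/translate.py | CodeLang
-- ===== SOURCE A (Python) =====
-- def CodeLang(lang):
--     """Отримання коду мови з назви або коду мови"""
--     lang_codes = {
--         'en': 'English', 'uk': 'Ukrainian', 'de': 'German', 'fr': 'French', 'es': 'Spanish', 'ru': 'Russian',
--         'it': 'Italian', 'zh': 'Chinese', 'ja': 'Japanese'
--     }
--     if lang.lower() in lang_codes:
--         return lang.lower()
--     for code, name in lang_codes.items():
--         if lang.lower() == name.lower():
--             return code
--     raise ValueError("Невірний код або назва мови")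
-- ===== SOURCE B (Python) =====
-- # B resolves the query by BINARY SEARCH over a statically sorted merged table
-- # (lowered name -> code and code -> code), instead of A's hash check followed
-- # by a linear scan over the items.
-- _TABLE = [
--     ('chinese', 'zh'), ('de', 'de'), ('en', 'en'), ('english', 'en'),
--     ('es', 'es'), ('fr', 'fr'), ('french', 'fr'), ('german', 'de'),
--     ('it', 'it'), ('italian', 'it'), ('ja', 'ja'), ('japanese', 'ja'),
--     ('ru', 'ru'), ('russian', 'ru'), ('spanish', 'es'), ('uk', 'uk'),
--     ('ukrainian', 'uk'), ('zh', 'zh'),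
-- ]
--
-- def CodeLang(lang):
--     """Отримання коду мови з назви або коду мови"""
--     key = lang.lower()
--     lo, hi = 0, len(_TABLE)
--     while lo < hi:
--         mid = (lo + hi) // 2
--         k, code = _TABLE[mid]
--         if k == key:
--             return code
--         if k < key:
--             lo = mid + 1
--         else:
--             hi = mid
--     raise ValueError("Невірний код або назва мови")
-- ===== Notes on version B (the rewrite author's own statement) =====
-- stated objective: alternative
-- what changed: B replaces A's dict-membership check followed by a linear scan over items with a binary search over one statically sorted merged table mapping lowered names and codes to codes.
import Mathlib
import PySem

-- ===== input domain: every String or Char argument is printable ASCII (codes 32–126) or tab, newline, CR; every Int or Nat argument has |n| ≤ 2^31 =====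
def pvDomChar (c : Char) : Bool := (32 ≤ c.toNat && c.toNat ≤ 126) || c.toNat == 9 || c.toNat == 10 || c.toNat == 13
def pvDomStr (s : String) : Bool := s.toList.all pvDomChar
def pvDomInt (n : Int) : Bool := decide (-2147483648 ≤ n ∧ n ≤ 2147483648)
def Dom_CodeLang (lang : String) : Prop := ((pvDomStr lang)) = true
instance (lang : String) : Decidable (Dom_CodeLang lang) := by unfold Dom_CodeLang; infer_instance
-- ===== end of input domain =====

-- B replaces A's dict-check-then-linear-scan with a binary search over a statically sorted merged table (objective: alternative).

-- ===== PORT A =====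
-- the dict literal `lang_codes` (insertion order; keys distinct, so mk = the literal)
def pvLangCodes : PySem.Dict String String :=
  PySem.Dict.mk
  [("en", "English"), ("uk", "Ukrainian"), ("de", "German"), ("fr", "French"),
   ("es", "Spanish"), ("ru", "Russian"), ("it", "Italian"), ("zh", "Chinese"),
   ("ja", "Japanese")]

-- the `for code, name in lang_codes.items()` loop; none = falls through to `raise`
def pvScan (l : String) : List (String × String) → Option String
  | [] => none
  | (code, name) :: rest =>
      if l == PySem.Str.lower name then some code else pvScan l rest

def CodeLang (lang : String) : String :=
  if (pvLangCodes.get? (PySem.Str.lower lang)).isSome then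
    PySem.Str.lower lang
  else
    match pvScan (PySem.Str.lower lang) pvLangCodes.items with
    | some code => code
    | none => ""   -- A raises ValueError here; excluded by Pre_CodeLang

-- ===== PORT B =====
-- Source B's statically sorted merged table _TABLE
def pvSortedTable : List (String × String) :=
  [("chinese", "zh"), ("de", "de"), ("en", "en"), ("english", "en"),
   ("es", "es"), ("fr", "fr"), ("french", "fr"), ("german", "de"),
   ("it", "it"), ("italian", "it"), ("ja", "ja"), ("japanese", "ja"),
   ("ru", "ru"), ("russian", "ru"), ("spanish", "es"), ("uk", "uk"),
   ("ukrainian", "uk"), ("zh", "zh")]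

-- the `while lo < hi` binary-search loop; fuel = table length (the interval halves,
-- so 18 steps always suffice) is only a totality guard; none = falls through to `raise`
def pvBSearch (key : String) : Nat → Nat → Nat → Option String
  | 0, _, _ => none
  | fuel + 1, lo, hi =>
      if lo < hi then
        let mid := (lo + hi) / 2
        let p := pvSortedTable.getD mid ("", "")
        if p.1 == key then some p.2
        else if p.1.toList < key.toList then pvBSearch key fuel (mid + 1) hi  -- Python's `k < key`: code-point lexicographic, exact via Char lists
        else pvBSearch key fuel lo mid
      else none

def CodeLang_alt (lang : String) : String :=
  match pvBSearch (PySem.Str.lower lang) pvSortedTable.length 0 pvSortedTable.length with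
  | some code => code
  | none => ""   -- B raises ValueError here; excluded by Pre_CodeLang

-- ===== PRECONDITION & SPEC =====
-- Pre_ excludes exactly the inputs on which A raises ValueError (a string that is neither a known code nor a known name, case-insensitively).
def Pre_CodeLang (lang : String) : Prop :=
  (pvLangCodes.items.any (fun p => PySem.Str.lower lang == p.1
      || PySem.Str.lower lang == PySem.Str.lower p.2)) = true
instance (lang : String) : Decidable (Pre_CodeLang lang) := by unfold Pre_CodeLang; infer_instance
def pvWitness_CodeLang : String := "English"

def Spec_CodeLang (lang : String) (out : String) : Prop := out = CodeLang_alt lang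
instance (lang : String) (out : String) : Decidable (Spec_CodeLang lang out) := by unfold Spec_CodeLang; infer_instance

-- ===== CLAIM (what is proved, stated in full; the proofs are below) =====
def Claim_equal_CodeLang : Prop := ∀ (lang : String), Dom_CodeLang lang → Pre_CodeLang lang → Spec_CodeLang lang (CodeLang lang)

-- ===== LEMMAS AND PROOFS =====

-- Under Pre_, lower lang is one of the 18 known keys.
theorem pre_mem (lang : String) (h : Pre_CodeLang lang) :
    PySem.Str.lower lang ∈
      ["en","uk","de","fr","es","ru","it","zh","ja",
       "english","ukrainian","german","french","spanish","russian",
       "italian","chinese","japanese"] := by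
  unfold Pre_CodeLang at h
  simp [pvLangCodes] at h
  rcases h with h|h|h|h|h|h|h|h|h <;> rcases h with h|h <;> rw [h] <;> decide

-- Both ports depend on lang only through lower lang; check each key.
theorem agree_on_key (k : String)
    (hk : k ∈ ["en","uk","de","fr","es","ru","it","zh","ja",
       "english","ukrainian","german","french","spanish","russian",
       "italian","chinese","japanese"])
    (lang : String) (hl : PySem.Str.lower lang = k) :
    CodeLang lang = CodeLang_alt lang := by
  unfold CodeLang CodeLang_alt
  rw [hl]
  fin_cases hk <;> decide

-- ===== VERDICT (by name: the statement is the Claim_ definition above) =====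
theorem CodeLang_spec : Claim_equal_CodeLang := by
  intro lang _ hpre
  unfold Spec_CodeLang
  exact agree_on_key _ (pre_mem lang hpre) lang rfl
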